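-- pv_equiv track=rewrite | github.com/younginshin115/TIL | lvl1/모의고사.py | solution
-- ===== SOURCE A (Python) =====
-- def solution(answers):
--     answer = []
--     def student(answers, pattern):
--         num = 0
--         correct_num = 0
--         for i in range(len(answers)):
--             if i != 0 and i % len(pattern) == 0:
--                 num += len(pattern)
--             if answers[i] == pattern[i-num]:
--                 correct_num += 1
--         return correct_num
--     def grade(*scores):
--         total_lst = []
--         for i in scores:
--             total_lst.append(i)
--         max_score = max(total_lst)
--         for i in range(len(scores)):
--             if scores[i] == max_score:
--                 answer.append(i+1)
--
--     st1_pattern = [1,2,3,4,5]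
--     st2_pattern = [2, 1, 2, 3, 2, 4, 2, 5]
--     st3_pattern = [3, 3, 1, 1, 2, 2, 4, 4, 5, 5]
--     s1 = student(answers, st1_pattern)
--     s2 = student(answers, st2_pattern)
--     s3 = student(answers, st3_pattern)
--     grade(s1, s2, s3)
--
--     return answer
-- ===== SOURCE B (Python) =====
-- def solution(answers):
--     patterns = [[1, 2, 3, 4, 5],
--                 [2, 1, 2, 3, 2, 4, 2, 5],
--                 [3, 3, 1, 1, 2, 2, 4, 4, 5, 5]]
--     # Precompute one lookup table per position residue modulo 40 (the lcm of the
--     # three pattern periods): table[r] maps an answer value to the score-increment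
--     # triple it earns at any position i with i % 40 == r.  The scan over answers is
--     # then a single dict lookup per element -- no pattern is consulted during it.
--     table = []
--     for r in range(40):
--         row = {}
--         for j, p in enumerate(patterns):
--             v = p[r % len(p)]
--             a0, a1, a2 = row.get(v, (0, 0, 0))
--             row[v] = (a0 + (j == 0), a1 + (j == 1), a2 + (j == 2))
--         table.append(row)
--     s1 = s2 = s3 = 0
--     for i, a in enumerate(answers):
--         d1, d2, d3 = table[i % 40].get(a, (0, 0, 0))
--         s1 += d1
--         s2 += d2
--         s3 += d3
--     best = max(s1, s2, s3)
--     return [j + 1 for j, s in enumerate((s1, s2, s3)) if s == best]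
-- ===== Notes on version B (the rewrite author's own statement) =====
-- stated objective: faster
-- what changed: Instead of scanning answers against each pattern, B precomputes a 40-entry lookup table (40 = lcm of the three pattern periods) mapping position-residue and answer value to a score-increment triple, so the scan over answers is one dict lookup per element with no pattern consulted; winners then come from a comprehension over the final triple, replacing A's three per-student scans and the side-effecting grade helper.
import Mathlib
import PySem

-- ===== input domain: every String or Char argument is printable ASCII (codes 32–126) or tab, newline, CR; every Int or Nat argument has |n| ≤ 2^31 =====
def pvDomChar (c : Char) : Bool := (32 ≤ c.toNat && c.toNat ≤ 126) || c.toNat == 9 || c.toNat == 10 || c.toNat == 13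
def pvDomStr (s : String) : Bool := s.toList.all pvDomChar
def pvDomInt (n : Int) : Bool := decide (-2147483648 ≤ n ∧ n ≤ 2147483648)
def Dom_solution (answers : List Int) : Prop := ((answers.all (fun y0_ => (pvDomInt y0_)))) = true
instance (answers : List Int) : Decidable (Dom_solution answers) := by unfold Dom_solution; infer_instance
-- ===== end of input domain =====

-- B replaces A's three per-student scans (each with a manual cyclic offset) and the side-effecting
-- grade helper by a precomputed 40-entry (lcm of the periods) residue→answer→increment-triple
-- lookup table; the scan over answers is one table lookup per element (a constant-factor speedup
-- measured).

-- ===== PORT A =====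
-- inner helper 'student': the indices i and i-num are always in range, so pyGetD (default 0) is exact
def studentA (answers : List Int) (pattern : List Int) : Int :=
  ((PySem.List.pyRange 0 answers.length 1).foldl
    (fun (s : Int × Int) i =>
      let num := if i ≠ 0 ∧ PySem.Int.mod i pattern.length = 0 then s.1 + pattern.length else s.1
      (num,
        if PySem.List.pyGetD answers i 0 = PySem.List.pyGetD pattern (i - num) 0
        then s.2 + 1 else s.2))
    (0, 0)).2

def solution (answers : List Int) : List Int :=
  let s1 := studentA answers [1, 2, 3, 4, 5]
  let s2 := studentA answers [2, 1, 2, 3, 2, 4, 2, 5]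
  let s3 := studentA answers [3, 3, 1, 1, 2, 2, 4, 4, 5, 5]
  -- grade(s1, s2, s3): total_lst append loop, max(total_lst), then the answer-building loop
  let scores : List Int := [s1, s2, s3]
  let totalLst := scores.foldl (fun acc i => acc ++ [i]) []
  let maxScore := (PySem.List.max? totalLst (fun x => x)).getD 0  -- totalLst is nonempty: max never raises
  (PySem.List.pyRange 0 3 1).foldl
    (fun acc i => if PySem.List.pyGetD scores i 0 = maxScore then acc ++ [i + 1] else acc) []

-- ===== PORT B =====
-- row.get(v,(0,0,0)) → Dict.getD; j==0 etc. added as 0/1; indices r % len(p) and i % 40 in range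
def patternsB : List (List Int) :=
  [[1, 2, 3, 4, 5], [2, 1, 2, 3, 2, 4, 2, 5], [3, 3, 1, 1, 2, 2, 4, 4, 5, 5]]

def tableB : List (PySem.Dict Int (Int × Int × Int)) :=
  (PySem.List.pyRange 0 40 1).foldl
    (fun tb r =>
      let row := (PySem.List.enumerate patternsB 0).foldl
        (fun (row : PySem.Dict Int (Int × Int × Int)) jp =>
          let v := PySem.List.pyGetD jp.2 (PySem.Int.mod r jp.2.length) 0
          let d := row.getD v (0, 0, 0)
          row.insert v
            (d.1 + (if jp.1 = 0 then 1 else 0),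
             d.2.1 + (if jp.1 = 1 then 1 else 0),
             d.2.2 + (if jp.1 = 2 then 1 else 0)))
        PySem.Dict.empty
      tb ++ [row])
    []

def solution_alt (answers : List Int) : List Int :=
  let s := (PySem.List.enumerate answers 0).foldl
    (fun (s : Int × Int × Int) ia =>
      let d := (PySem.List.pyGetD tableB (PySem.Int.mod ia.1 40) PySem.Dict.empty).getD ia.2 (0, 0, 0)
      (s.1 + d.1, s.2.1 + d.2.1, s.2.2 + d.2.2))
    (0, 0, 0)
  let best := max s.1 (max s.2.1 s.2.2)
  (PySem.List.enumerate [s.1, s.2.1, s.2.2] 0).foldl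
    (fun acc js => if js.2 = best then acc ++ [js.1 + 1] else acc) []

-- ===== PRECONDITION & SPEC =====
def Spec_solution (answers : List Int) (out : List Int) : Prop := out = solution_alt answers
instance (answers : List Int) (out : List Int) : Decidable (Spec_solution answers out) := by unfold Spec_solution; infer_instance

-- ===== CLAIM (what is proved, stated in full; the proofs are below) =====
def Claim_equal_solution : Prop := ∀ (answers : List Int), Dom_solution answers → Spec_solution answers (solution answers)

-- ===== LEMMAS AND PROOFS =====

-- number of positions k, k+1, … of l whose element matches pattern p cyclically
def cnt (p : List Int) (k : Int) : List Int → Int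
  | [] => 0
  | a :: t =>
      (if a = PySem.List.pyGetD p (PySem.Int.mod k p.length) 0 then 1 else 0) + cnt p (k + 1) t

-- A's 'student' loop: from index m on, with the offset invariant num = len * ((m-1)/len)
theorem studentA_fold (p l : List Int) :
    ∀ (k m : Nat) (c : Int), m + k = l.length →
      ((PySem.List.pyRange (m : Int) l.length 1).foldl
        (fun (s : Int × Int) i =>
          let num := if i ≠ 0 ∧ PySem.Int.mod i p.length = 0 then s.1 + p.length else s.1
          (num,
            if PySem.List.pyGetD l i 0 = PySem.List.pyGetD p (i - num) 0
            then s.2 + 1 else s.2))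
        ((p.length : Int) * (((m - 1) / p.length : Nat) : Int), c)).2
      = c + cnt p (m : Int) (l.drop m) := by
  intro k
  induction k with
  | zero =>
      intro m c hm
      rw [PySem.List.pyRange_one_eq_nil (by exact_mod_cast (by omega : l.length ≤ m))]
      simp [List.drop_eq_nil_of_le (by omega : l.length ≤ m), cnt]
  | succ k ih =>
      intro m c hm
      have hmlt : m < l.length := by omega
      rw [PySem.List.pyRange_one_cons (by exact_mod_cast hmlt), List.foldl_cons]
      have hmodc : PySem.Int.mod (m : Int) (p.length : Int) = ((m % p.length : Nat) : Int) :=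
        PySem.Int.mod_natCast m p.length
      have hnum : (if (m : Int) ≠ 0 ∧ PySem.Int.mod (m : Int) (p.length : Int) = 0
            then (p.length : Int) * (((m - 1) / p.length : Nat) : Int) + p.length
            else (p.length : Int) * (((m - 1) / p.length : Nat) : Int))
          = (p.length : Int) * ((m / p.length : Nat) : Int) := by
        rcases m with _ | s
        · simp
        · have hsd : (s + 1) / p.length = s / p.length + if p.length ∣ s + 1 then 1 else 0 :=
            Nat.succ_div
          by_cases hdvd : p.length ∣ s + 1
          · have hm0 : (s + 1) % p.length = 0 := Nat.mod_eq_zero_of_dvd hdvd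
            rw [hmodc, if_pos ⟨by exact_mod_cast Nat.succ_ne_zero s, by exact_mod_cast hm0⟩]
            simp only [Nat.add_sub_cancel, hsd, if_pos hdvd]
            push_cast; ring
          · have hm0 : (s + 1) % p.length ≠ 0 := fun h => hdvd (Nat.dvd_of_mod_eq_zero h)
            rw [hmodc, if_neg (by intro h; exact hm0 (by exact_mod_cast h.2))]
            simp only [Nat.add_sub_cancel, hsd, if_neg hdvd, Nat.add_zero]
      have hidx : (m : Int) - (p.length : Int) * ((m / p.length : Nat) : Int)
          = ((m % p.length : Nat) : Int) := by
        have h2 : (p.length : Int) * ((m / p.length : Nat) : Int) + ((m % p.length : Nat) : Int)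
            = (m : Int) := by exact_mod_cast Nat.div_add_mod m p.length
        omega
      have hget : PySem.List.pyGetD l (m : Int) 0 = l.getD m 0 := by
        simp [PySem.List.pyGetD_natCast]
      have hdrop : l.drop m = l[m] :: l.drop (m + 1) := List.drop_eq_getElem_cons hmlt
      simp only [ne_eq, hnum, hidx, hget]
      have hcast : ((m : Int) + 1) = ((m + 1 : Nat) : Int) := by push_cast; ring
      have ih' := ih (m + 1) (if l.getD m 0 = PySem.List.pyGetD p ((m % p.length : Nat) : Int) 0
        then c + 1 else c) (by omega)
      simp only [ne_eq, Nat.add_sub_cancel] at ih'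
      rw [hcast, ih']
      rw [hdrop]
      show _ = c + ((if l[m] = PySem.List.pyGetD p (PySem.Int.mod (m : Int) (p.length)) 0
        then 1 else 0) + cnt p ((m : Int) + 1) (l.drop (m + 1)))
      rw [hmodc]
      have hgd : l.getD m 0 = l[m] := by
        simp [List.getD_eq_getElem?_getD, List.getElem?_eq_getElem hmlt]
      rw [hgd, hcast]
      split_ifs <;> ring

theorem studentA_eq (p l : List Int) : studentA l p = cnt p 0 l := by
  have h := studentA_fold p l l.length 0 0 (by omega)
  simpa [studentA] using h

-- what one row of B's table returns for an arbitrary answer value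
def rowFun (r : Int) (a : Int) : Int × Int × Int :=
  ((if a = PySem.List.pyGetD [1,2,3,4,5] (PySem.Int.mod r 5) 0 then 1 else 0),
   (if a = PySem.List.pyGetD [2,1,2,3,2,4,2,5] (PySem.Int.mod r 8) 0 then 1 else 0),
   (if a = PySem.List.pyGetD [3,3,1,1,2,2,4,4,5,5] (PySem.Int.mod r 10) 0 then 1 else 0))

-- the row builder of B's table at residue r (the inner fold of tableB over the 3 patterns)
def mkRow (r : Int) : PySem.Dict Int (Int × Int × Int) :=
  (PySem.List.enumerate patternsB 0).foldl
    (fun (row : PySem.Dict Int (Int × Int × Int)) jp =>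
      let v := PySem.List.pyGetD jp.2 (PySem.Int.mod r jp.2.length) 0
      let d := row.getD v (0, 0, 0)
      row.insert v
        (d.1 + (if jp.1 = 0 then 1 else 0),
         d.2.1 + (if jp.1 = 1 then 1 else 0),
         d.2.2 + (if jp.1 = 2 then 1 else 0)))
    PySem.Dict.empty

-- looked up at any value a, the three-insert row yields the indicator triple (key collisions included)
theorem mkRow_getD (r a : Int) : (mkRow r).getD a (0, 0, 0) = rowFun r a := by
  simp only [mkRow, patternsB, PySem.List.enumerate, List.foldl, rowFun]
  set v1 := PySem.List.pyGetD [1,2,3,4,5] (PySem.Int.mod r 5) 0 with hv1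
  set v2 := PySem.List.pyGetD [2,1,2,3,2,4,2,5] (PySem.Int.mod r 8) 0 with hv2
  set v3 := PySem.List.pyGetD [3,3,1,1,2,2,4,4,5,5] (PySem.Int.mod r 10) 0 with hv3
  norm_num [PySem.Dict.getD_insert, PySem.Dict.getD_empty]
  split_ifs <;> simp_all

-- B's table is the list of rows mkRow 0 … mkRow 39
theorem tableB_eq_map : tableB = (PySem.List.pyRange 0 40 1).map mkRow := by
  exact (PySem.List.foldl_append_singleton_eq_map mkRow (PySem.List.pyRange 0 40 1) []).trans
    (List.nil_append _)

-- B's table, looked up at residue r and value a, is exactly the indicator triple rowFun r a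
theorem tableB_lookup (r : Nat) (hr : r < 40) (a : Int) :
    (PySem.List.pyGetD tableB ((r : Int)) PySem.Dict.empty).getD a (0, 0, 0) = rowFun (r : Int) a := by
  have hget : PySem.List.pyGetD tableB ((r : Int)) PySem.Dict.empty = mkRow ((r : Int)) := by
    rw [tableB_eq_map, PySem.List.pyGetD_natCast]
    rw [List.getD_eq_getElem?_getD,
      List.getElem?_eq_getElem (by simp [PySem.List.length_pyRange_one]; omega)]
    simp [PySem.List.getElem_pyRange_one]
  rw [hget, mkRow_getD]

-- B's scan accumulates the three cyclic-match counts
theorem altB_fold (l : List Int) :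
    ∀ (k : Nat) (x y z : Int),
      ((PySem.List.enumerate l (k : Int)).foldl
        (fun (s : Int × Int × Int) ia =>
          let d := (PySem.List.pyGetD tableB (PySem.Int.mod ia.1 40) PySem.Dict.empty).getD ia.2 (0, 0, 0)
          (s.1 + d.1, s.2.1 + d.2.1, s.2.2 + d.2.2))
        (x, y, z))
      = (x + cnt [1,2,3,4,5] (k : Int) l,
         y + cnt [2,1,2,3,2,4,2,5] (k : Int) l,
         z + cnt [3,3,1,1,2,2,4,4,5,5] (k : Int) l) := by
  induction l with
  | nil => intro k x y z; simp [PySem.List.enumerate, cnt]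
  | cons a t ih =>
      intro k x y z
      rw [show PySem.List.enumerate (a :: t) (k : Int) = ((k : Int), a) :: PySem.List.enumerate t ((k : Int) + 1) from
        PySem.List.enumerate_cons a t (k : Int)]
      rw [List.foldl_cons]
      have hmod : PySem.Int.mod ((k : Int)) 40 = (((k % 40 : Nat) : Int)) := by
        exact_mod_cast PySem.Int.mod_natCast k 40
      have hlook := tableB_lookup (k % 40) (Nat.mod_lt k (by norm_num)) a
      have hr5 : PySem.Int.mod (((k % 40 : Nat) : Int)) 5 = PySem.Int.mod ((k : Int)) 5 := by
        rw [show ((5 : Int)) = ((5 : Nat) : Int) from rfl,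
          PySem.Int.mod_natCast, PySem.Int.mod_natCast,
          Nat.mod_mod_of_dvd k (by norm_num : 5 ∣ 40)]
      have hr8 : PySem.Int.mod (((k % 40 : Nat) : Int)) 8 = PySem.Int.mod ((k : Int)) 8 := by
        rw [show ((8 : Int)) = ((8 : Nat) : Int) from rfl,
          PySem.Int.mod_natCast, PySem.Int.mod_natCast,
          Nat.mod_mod_of_dvd k (by norm_num : 8 ∣ 40)]
      have hr10 : PySem.Int.mod (((k % 40 : Nat) : Int)) 10 = PySem.Int.mod ((k : Int)) 10 := by
        rw [show ((10 : Int)) = ((10 : Nat) : Int) from rfl,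
          PySem.Int.mod_natCast, PySem.Int.mod_natCast,
          Nat.mod_mod_of_dvd k (by norm_num : 10 ∣ 40)]
      simp only [hmod, hlook, rowFun, hr5, hr8, hr10]
      have hcast : ((k : Int) + 1) = ((k + 1 : Nat) : Int) := by push_cast; ring
      rw [hcast, ih (k + 1)]
      simp only [cnt, Prod.mk.injEq, List.length_cons, List.length_nil]
      push_cast
      refine ⟨by ring, by ring, by ring⟩

theorem solution_eq_alt (answers : List Int) : solution answers = solution_alt answers := by
  have h1 := studentA_eq [1,2,3,4,5] answers
  have h2 := studentA_eq [2,1,2,3,2,4,2,5] answers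
  have h3 := studentA_eq [3,3,1,1,2,2,4,4,5,5] answers
  have hb := altB_fold answers 0 0 0 0
  simp only [solution, solution_alt, h1, h2, h3]
  rw [show ((0 : Int)) = ((0 : Nat) : Int) from rfl] at hb ⊢
  rw [hb]
  generalize cnt [1,2,3,4,5] ((0 : Nat) : Int) answers = c1
  generalize cnt [2,1,2,3,2,4,2,5] ((0 : Nat) : Int) answers = c2
  generalize cnt [3,3,1,1,2,2,4,4,5,5] ((0 : Nat) : Int) answers = c3
  have hm : (PySem.List.max? [c1, c2, c3] fun x => x).getD 0 = max c1 (max c2 c3) := by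
    rw [PySem.List.max?_id_cons]; simp [List.foldl, max_assoc]
  norm_num [PySem.List.enumerate, PySem.List.pyRange, List.foldl, hm,
    PySem.List.pyGetD, PySem.List.pyGet?, PySem.List.pyIdx?]
  rw [show Int.toNat 3 = 3 from rfl]
  norm_num [List.range_succ, List.foldl, show Int.toNat 2 = 2 from rfl, show Int.toNat 1 = 1 from rfl]

-- ===== VERDICT (by name: the statement is the Claim_ definition above) =====
theorem solution_spec : Claim_equal_solution := by
  intro answers _
  unfold Spec_solution
  exact solution_eq_alt answers
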